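-- pv_equiv track=rewrite | github.com/jjoshua2/arc_agi | unsolved/2025-10-11T04-29-28Z/e73095fd_best1.py | transform
-- ===== SOURCE A (Python) =====
-- from collections import deque
-- from typing import List
--
-- def transform(grid: List[List[int]]) -> List[List[int]]:
--     if not grid or not grid[0]:
--         return grid
--     rows = len(grid)
--     cols = len(grid[0])
--     out = [row[:] for row in grid]
--
--     # Visited mask for zeros reachable from the top row (the "outside" zeros)
--     visited = [[False]*cols for _ in range(rows)]
--     q = deque()
--
--     # Start BFS from zeros on the top row (row 0) only
--     for c in range(cols):
--         if grid[0][c] == 0: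
--             visited[0][c] = True
--             q.append((0, c))
--
--     # 4-directional BFS
--     while q:
--         r, c = q.popleft()
--         for dr, dc in ((-1,0),(1,0),(0,-1),(0,1)):
--             nr, nc = r + dr, c + dc
--             if 0 <= nr < rows and 0 <= nc < cols:
--                 if not visited[nr][nc] and grid[nr][nc] == 0:
--                     visited[nr][nc] = True
--                     q.append((nr, nc))
--
--     # Any zero not visited is an enclosed pocket -> fill with 4
--     for r in range(rows):
--         for c in range(cols):
--             if grid[r][c] == 0 and not visited[r][c]:
--                 out[r][c] = 4
--
--     return out
-- ===== SOURCE B (Python) =====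
-- from typing import List
--
-- def transform(grid: List[List[int]]) -> List[List[int]]:
--     if not grid or not grid[0]:
--         return grid
--     rows, cols = len(grid), len(grid[0])
--     # Mark zeros reachable from the top row by repeated whole-grid sweeps
--     # until the marking stabilises (no queue/stack, just a fixpoint iteration).
--     reach = [[r == 0 and grid[0][c] == 0 for c in range(cols)] for r in range(rows)]
--     changed = True
--     while changed:
--         changed = False
--         for r in range(rows):
--             for c in range(cols):
--                 if grid[r][c] == 0 and not reach[r][c] and (
--                     (r > 0 and reach[r - 1][c])
--                     or (r + 1 < rows and reach[r + 1][c])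
--                     or (c > 0 and reach[r][c - 1])
--                     or (c + 1 < cols and reach[r][c + 1])
--                 ):
--                     reach[r][c] = True
--                     changed = True
--     out = [row[:] for row in grid]
--     for r in range(rows):
--         for c in range(cols):
--             if grid[r][c] == 0 and not reach[r][c]:
--                 out[r][c] = 4
--     return out
-- ===== Notes on version B (the rewrite author's own statement) =====
-- stated objective: alternative
-- what changed: A's BFS from the top row (deque + visited mask) is replaced by a queue-free fixpoint computation: reachability marks are propagated by repeated whole-grid sweeps until a sweep changes nothing.
import Mathlib
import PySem

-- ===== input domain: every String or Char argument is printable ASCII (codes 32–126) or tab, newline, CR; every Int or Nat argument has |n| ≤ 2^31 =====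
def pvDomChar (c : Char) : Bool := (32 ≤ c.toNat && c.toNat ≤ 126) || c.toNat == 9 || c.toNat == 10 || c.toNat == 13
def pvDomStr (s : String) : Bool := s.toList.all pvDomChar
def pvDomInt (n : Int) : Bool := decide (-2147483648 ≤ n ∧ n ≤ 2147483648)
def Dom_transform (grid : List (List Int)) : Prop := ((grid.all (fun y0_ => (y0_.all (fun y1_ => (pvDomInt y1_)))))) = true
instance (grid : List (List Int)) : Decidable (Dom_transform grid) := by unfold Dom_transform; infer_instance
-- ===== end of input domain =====

-- B replaces A's BFS queue by repeated whole-grid fixpoint sweeps (alternative decomposition, not claimed faster);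
-- the equivalence is about the RETURN value (neither implementation mutates its argument).

-- shared 2-D helpers (Python `m[r][c]` read / write on a rows×cols matrix, indices already bounds-checked)
def pvGet {α : Type} (m : List (List α)) (r c : Int) (d : α) : α :=
  (m.getD r.toNat []).getD c.toNat d

def pvSet {α : Type} (m : List (List α)) (r c : Int) (x : α) : List (List α) :=
  m.set r.toNat ((m.getD r.toNat []).set c.toNat x)

-- Python `out = [row[:] for row in grid]` then the shared final double loop writing 4s (identical in A and B)
def pvFill (g : List (List Int)) (rows cols : Int) (v : List (List Bool)) : List (List Int) :=
  (PySem.List.pyRange 0 rows 1).foldl (fun out r =>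
    (PySem.List.pyRange 0 cols 1).foldl (fun out c =>
      if pvGet g r c 0 = 0 ∧ pvGet v r c false = false then pvSet out r c 4 else out) out) g

-- ===== PORT A =====
def bfsStep (g : List (List Int)) (rows cols r c : Int)
    (st : List (List Bool) × List (Int × Int)) (d : Int × Int) :
    List (List Bool) × List (Int × Int) :=
  let nr := r + d.1
  let nc := c + d.2
  if 0 ≤ nr ∧ nr < rows ∧ 0 ≤ nc ∧ nc < cols then
    if pvGet st.1 nr nc false = false ∧ pvGet g nr nc 0 = 0 then
      (pvSet st.1 nr nc true, st.2 ++ [(nr, nc)])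
    else st
  else st

def bfsLoop (g : List (List Int)) (rows cols : Int) :
    Nat → List (List Bool) → List (Int × Int) → List (List Bool)
  | 0, v, _ => v
  | _ + 1, v, [] => v
  | fuel + 1, v, (r, c) :: q =>
      let st := [((-1 : Int), (0 : Int)), (1, 0), (0, -1), (0, 1)].foldl
        (bfsStep g rows cols r c) (v, q)
      bfsLoop g rows cols fuel st.1 st.2

def transform (grid : List (List Int)) : List (List Int) :=
  if grid = [] ∨ grid.headD [] = [] then grid
  else
    let rows : Int := grid.length
    let cols : Int := (grid.headD []).length
    let visited0 : List (List Bool) :=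
      List.replicate grid.length (List.replicate (grid.headD []).length false)
    let seeded := (PySem.List.pyRange 0 cols 1).foldl
      (fun (st : List (List Bool) × List (Int × Int)) c =>
        if pvGet grid 0 c 0 = 0 then (pvSet st.1 0 c true, st.2 ++ [((0 : Int), c)]) else st)
      (visited0, [])
    -- fuel 3·rows·cols+3 bounds the loop's measure 2·(unvisited cells)+|queue|; the queue always empties within it
    let visited := bfsLoop grid rows cols (3 * grid.length * (grid.headD []).length + 3) seeded.1 seeded.2
    pvFill grid rows cols visited

-- ===== PORT B =====
def sweepCell (g : List (List Int)) (rows cols : Int)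
    (st : List (List Bool) × Bool) (r c : Int) : List (List Bool) × Bool :=
  if pvGet g r c 0 = 0 ∧ pvGet st.1 r c false = false ∧
      ((0 < r ∧ pvGet st.1 (r - 1) c false = true) ∨
       (r + 1 < rows ∧ pvGet st.1 (r + 1) c false = true) ∨
       (0 < c ∧ pvGet st.1 r (c - 1) false = true) ∨
       (c + 1 < cols ∧ pvGet st.1 r (c + 1) false = true)) then
    (pvSet st.1 r c true, true)
  else st

def pvSweep (g : List (List Int)) (rows cols : Int) (v : List (List Bool)) :
    List (List Bool) × Bool :=
  (PySem.List.pyRange 0 rows 1).foldl (fun st r =>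
    (PySem.List.pyRange 0 cols 1).foldl (fun st c => sweepCell g rows cols st r c) st)
    (v, false)

def sweepLoop (g : List (List Int)) (rows cols : Int) :
    Nat → List (List Bool) → List (List Bool)
  | 0, v => v
  | fuel + 1, v =>
      let p := pvSweep g rows cols v
      if p.2 then sweepLoop g rows cols fuel p.1 else p.1

def transform_alt (grid : List (List Int)) : List (List Int) :=
  if grid = [] ∨ grid.headD [] = [] then grid
  else
    let rows : Int := grid.length
    let cols : Int := (grid.headD []).length
    let reach0 : List (List Bool) :=
      (PySem.List.pyRange 0 rows 1).map (fun r =>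
        (PySem.List.pyRange 0 cols 1).map (fun c =>
          decide (r = 0 ∧ pvGet grid 0 c 0 = 0)))
    -- fuel rows·cols+1: every sweep that reports a change marks at least one new cell
    let reach := sweepLoop grid rows cols (grid.length * (grid.headD []).length + 1) reach0
    pvFill grid rows cols reach

-- ===== PRECONDITION & SPEC =====
-- Pre_ excludes exactly the ragged grids on which the Python A (and B) raises IndexError
-- (some row shorter than the first row); A returns normally on every other input.
-- The Lean ports read cells with an in-bounds getD (exact inside Pre_), and they agree
-- even outside it, so the equivalence proof does not need the hypothesis.
def Pre_transform (grid : List (List Int)) : Prop :=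
  ∀ row ∈ grid, (grid.headD []).length ≤ row.length

instance (grid : List (List Int)) : Decidable (Pre_transform grid) := by
  unfold Pre_transform; infer_instance

def pvWitness_transform : List (List Int) := [[0, 1, 0], [1, 0, 1], [1, 1, 1]]

def Spec_transform (grid : List (List Int)) (out : List (List Int)) : Prop := out = transform_alt grid
instance (grid : List (List Int)) (out : List (List Int)) : Decidable (Spec_transform grid out) := by
  unfold Spec_transform; infer_instance

-- ===== CLAIM (what is proved, stated in full; the proofs are below) =====
def Claim_equal_transform : Prop :=
  ∀ (grid : List (List Int)), Dom_transform grid → Pre_transform grid →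
    Spec_transform grid (transform grid)

-- ===== LEMMAS AND PROOFS =====


-- ---------- foundation: matrix view, zero cells, adjacency, reachability ----------

def toN (z : Int × Int) : Nat × Nat := (z.1.toNat, z.2.toNat)

def mget (v : List (List Bool)) (p : Nat × Nat) : Bool := (v.getD p.1 []).getD p.2 false

def Shape (g : List (List Int)) (v : List (List Bool)) : Prop :=
  v.length = g.length ∧ ∀ row ∈ v, row.length = (g.headD []).length

def boxg (g : List (List Int)) : Finset (Nat × Nat) :=
  Finset.range g.length ×ˢ Finset.range (g.headD []).length

def mcard (g : List (List Int)) (v : List (List Bool)) : Nat :=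
  ((boxg g).filter (fun p => mget v p = true)).card

def Zc (g : List (List Int)) (p : Nat × Nat) : Prop :=
  p.1 < g.length ∧ p.2 < (g.headD []).length ∧ (g.getD p.1 []).getD p.2 0 = 0

def GAdj (p q : Nat × Nat) : Prop :=
  (p.1 = q.1 ∧ (p.2 + 1 = q.2 ∨ q.2 + 1 = p.2)) ∨
  (p.2 = q.2 ∧ (p.1 + 1 = q.1 ∨ q.1 + 1 = p.1))

def AdjC (g : List (List Int)) (p q : Nat × Nat) : Prop :=
  Zc g p ∧ Zc g q ∧ GAdj p q

def ReachC (g : List (List Int)) (p : Nat × Nat) : Prop :=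
  ∃ b : Nat, Zc g (0, b) ∧ Relation.ReflTransGen (AdjC g) (0, b) p

lemma reachC_seed {g : List (List Int)} {b : Nat} (h : Zc g (0, b)) : ReachC g (0, b) :=
  ⟨b, h, Relation.ReflTransGen.refl⟩

lemma reachC_step {g : List (List Int)} {p q : Nat × Nat} (h : ReachC g p) (ha : AdjC g p q) :
    ReachC g q := by
  obtain ⟨b, hb, hr⟩ := h
  exact ⟨b, hb, hr.tail ha⟩

lemma reachC_closed {g : List (List Int)} {P : Nat × Nat → Prop}
    (hseed : ∀ b : Nat, Zc g (0, b) → P (0, b))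
    (hcl : ∀ p q, P p → AdjC g p q → P q) :
    ∀ p, ReachC g p → P p := by
  rintro p ⟨b, hb, hr⟩
  induction hr with
  | refl => exact hseed b hb
  | tail _ ha ih => exact hcl _ _ ih ha

lemma shape_pvSet {g : List (List Int)} {v : List (List Bool)} (r c : Int) (x : Bool)
    (hs : Shape g v) : Shape g (pvSet v r c x) := by
  obtain ⟨hl, hrow⟩ := hs
  refine ⟨by simp [pvSet, hl], ?_⟩
  intro row hmem
  by_cases h1 : r.toNat < v.length
  · rcases List.mem_or_eq_of_mem_set hmem with h | h
    · exact hrow _ h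
    · subst h
      rw [List.length_set, List.getD_eq_getElem v [] h1]
      exact hrow _ (List.getElem_mem h1)
  · rw [pvSet, List.set_eq_of_length_le (Nat.le_of_not_lt h1)] at hmem
    exact hrow _ hmem
lemma mget_pvSet {g : List (List Int)} {v : List (List Bool)} {r c : Int}
    (hs : Shape g v) (_hr0 : 0 ≤ r) (hrR : r.toNat < g.length) (_hc0 : 0 ≤ c)
    (hcC : c.toNat < (g.headD []).length) (p : Nat × Nat) :
    mget (pvSet v r c true) p = if p = toN (r, c) then true else mget v p := by
  obtain ⟨hl, hrow⟩ := hs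
  have h1 : r.toNat < v.length := hl ▸ hrR
  have hrowlen : (v.getD r.toNat []).length = (g.headD []).length := by
    rw [List.getD_eq_getElem v [] h1]; exact hrow _ (List.getElem_mem h1)
  have h2 : c.toNat < (v.getD r.toNat []).length := hrowlen ▸ hcC
  have h2' : c.toNat < ((v[r.toNat]?.getD ([] : List Bool)) : List Bool).length := by
    rw [← List.getD_eq_getElem?_getD]; exact h2
  obtain ⟨a, b⟩ := p
  simp only [mget, pvSet, toN, List.getD_eq_getElem?_getD]
  by_cases hra : a = r.toNat
  · subst hra
    rw [List.getElem?_set_self h1, Option.getD_some]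
    by_cases hcb : b = c.toNat
    · subst hcb
      rw [List.getElem?_set_self h2', Option.getD_some]
      simp
    · rw [List.getElem?_set_ne (fun h => hcb h.symm)]
      simp [hcb]
  · rw [List.getElem?_set_ne (fun h => hra h.symm)]
    simp [hra]
lemma marked_pvSet {g : List (List Int)} {v : List (List Bool)} {r c : Int}
    (hs : Shape g v) (hr0 : 0 ≤ r) (hrR : r.toNat < g.length) (hc0 : 0 ≤ c)
    (hcC : c.toNat < (g.headD []).length) :
    (boxg g).filter (fun p => mget (pvSet v r c true) p = true) =
      insert (toN (r, c)) ((boxg g).filter (fun p => mget v p = true)) := by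
  ext p
  simp only [Finset.mem_filter, Finset.mem_insert]
  rw [mget_pvSet hs hr0 hrR hc0 hcC]
  by_cases hp : p = toN (r, c)
  · subst hp
    have hmem : toN (r, c) ∈ boxg g :=
      Finset.mem_product.mpr ⟨Finset.mem_range.mpr hrR, Finset.mem_range.mpr hcC⟩
    simp [hmem]
  · simp [hp]
lemma mcard_pvSet {g : List (List Int)} {v : List (List Bool)} {r c : Int}
    (hs : Shape g v) (hr0 : 0 ≤ r) (hrR : r.toNat < g.length) (hc0 : 0 ≤ c)
    (hcC : c.toNat < (g.headD []).length) (hun : mget v (toN (r, c)) = false) :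
    mcard g (pvSet v r c true) = mcard g v + 1 := by
  unfold mcard
  rw [marked_pvSet hs hr0 hrR hc0 hcC,
    Finset.card_insert_of_notMem (by simp [hun])]
lemma mcard_le {g : List (List Int)} (v : List (List Bool)) :
    mcard g v ≤ g.length * (g.headD []).length := by
  calc mcard g v ≤ (boxg g).card := Finset.card_filter_le _ _
    _ = g.length * (g.headD []).length := by simp [boxg]

lemma matrix_eq {g : List (List Int)} {v w : List (List Bool)}
    (hv : Shape g v) (hw : Shape g w) (h : ∀ p, mget v p = mget w p) : v = w := by
  obtain ⟨hvl, hvrow⟩ := hv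
  obtain ⟨hwl, hwrow⟩ := hw
  apply List.ext_getElem (by omega)
  intro i h1 h2
  apply List.ext_getElem
  · rw [hvrow _ (List.getElem_mem h1), hwrow _ (List.getElem_mem h2)]
  · intro j hj1 hj2
    have := h (i, j)
    rw [mget, mget, List.getD_eq_getElem v [] h1, List.getD_eq_getElem w [] h2,
      List.getD_eq_getElem _ _ hj1, List.getD_eq_getElem _ _ hj2] at this
    exact this

-- ---------- B side: the sweep fixpoint ----------

lemma reachC_Zc {g : List (List Int)} {p : Nat × Nat} (h : ReachC g p) : Zc g p := by
  obtain ⟨b, hb, hr⟩ := h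
  induction hr with
  | refl => exact hb
  | tail _ ha _ => exact ha.2.1

lemma foldl_flatMap {α β σ : Type} (l : List α) (inner : α → List β) (h : σ → β → σ)
    (init : σ) :
    l.foldl (fun st a => (inner a).foldl h st) init = (l.flatMap inner).foldl h init := by
  induction l generalizing init with
  | nil => rfl
  | cons x xs ih => simp [List.foldl_append, ih]

def cellsOf (rows cols : Int) : List (Int × Int) :=
  (PySem.List.pyRange 0 rows 1).flatMap (fun r => (PySem.List.pyRange 0 cols 1).map (fun c => (r, c)))

lemma mem_cellsOf {rows cols : Int} {z : Int × Int} :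
    z ∈ cellsOf rows cols ↔ 0 ≤ z.1 ∧ z.1 < rows ∧ 0 ≤ z.2 ∧ z.2 < cols := by
  obtain ⟨a, b⟩ := z
  simp only [cellsOf, List.mem_flatMap, List.mem_map, PySem.List.mem_pyRange_one]
  constructor
  · rintro ⟨r, ⟨h1, h2⟩, c, ⟨h3, h4⟩, he⟩
    obtain ⟨he1, he2⟩ := Prod.mk.injEq .. ▸ he
    subst he1; subst he2; exact ⟨h1, h2, h3, h4⟩
  · rintro ⟨h1, h2, h3, h4⟩
    exact ⟨a, ⟨h1, h2⟩, b, ⟨h3, h4⟩, rfl⟩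

lemma pvSweep_eq (g : List (List Int)) (rows cols : Int) (v : List (List Bool)) :
    pvSweep g rows cols v =
      (cellsOf rows cols).foldl (fun st z => sweepCell g rows cols st z.1 z.2) (v, false) := by
  rw [pvSweep, cellsOf, ← foldl_flatMap]
  congr 1
  funext st r
  rw [List.foldl_map]

lemma sweep_fold_props (g : List (List Int)) (zs : List (Int × Int))
    (hz : ∀ z ∈ zs, 0 ≤ z.1 ∧ z.1 < (g.length : Int) ∧ 0 ≤ z.2 ∧ z.2 < ((g.headD []).length : Int))
    (st : List (List Bool) × Bool) (hsh : Shape g st.1) :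
    Shape g (zs.foldl (fun st z => sweepCell g (g.length : Int) ((g.headD []).length : Int) st z.1 z.2) st).1 ∧
    (∀ p, mget st.1 p = true →
      mget (zs.foldl (fun st z => sweepCell g (g.length : Int) ((g.headD []).length : Int) st z.1 z.2) st).1 p = true) ∧
    mcard g st.1 ≤ mcard g (zs.foldl (fun st z => sweepCell g (g.length : Int) ((g.headD []).length : Int) st z.1 z.2) st).1 ∧
    ((zs.foldl (fun st z => sweepCell g (g.length : Int) ((g.headD []).length : Int) st z.1 z.2) st).2 = st.2 ∨
      ((zs.foldl (fun st z => sweepCell g (g.length : Int) ((g.headD []).length : Int) st z.1 z.2) st).2 = true ∧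
        mcard g st.1 < mcard g (zs.foldl (fun st z => sweepCell g (g.length : Int) ((g.headD []).length : Int) st z.1 z.2) st).1)) ∧
    ((∀ p, mget st.1 p = true → ReachC g p) →
      ∀ p, mget (zs.foldl (fun st z => sweepCell g (g.length : Int) ((g.headD []).length : Int) st z.1 z.2) st).1 p = true → ReachC g p) := by
  induction zs generalizing st with
  | nil => exact ⟨hsh, fun _ h => h, le_refl _, Or.inl rfl, fun hs => hs⟩
  | cons z zs ih =>
    obtain ⟨hz1, hz2, hz3, hz4⟩ := hz z (List.mem_cons_self)
    have hztl : ∀ z' ∈ zs, 0 ≤ z'.1 ∧ z'.1 < (g.length : Int) ∧ 0 ≤ z'.2 ∧ z'.2 < ((g.headD []).length : Int) :=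
      fun z' h => hz z' (List.mem_cons_of_mem _ h)
    simp only [List.foldl_cons]
    have hr1 : z.1.toNat < g.length := by omega
    have hc1 : z.2.toNat < (g.headD []).length := by omega
    -- analyse the single step
    have hstep : (sweepCell g (g.length : Int) ((g.headD []).length : Int) st z.1 z.2 = st) ∨
        (mget st.1 (toN z) = false ∧ Zc g (toN z) ∧
          (∃ p0, mget st.1 p0 = true ∧ GAdj p0 (toN z)) ∧
          sweepCell g (g.length : Int) ((g.headD []).length : Int) st z.1 z.2 =
            (pvSet st.1 z.1 z.2 true, true)) := by
      rw [sweepCell]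
      split_ifs with hcond
      · right
        obtain ⟨hzero, hunm, hnbr⟩ := hcond
        refine ⟨hunm, ⟨hr1, hc1, hzero⟩, ?_, rfl⟩
        rcases hnbr with ⟨hgt, hm⟩ | ⟨hlt, hm⟩ | ⟨hgt, hm⟩ | ⟨hlt, hm⟩
        · exact ⟨((z.1 - 1).toNat, z.2.toNat), hm, Or.inr ⟨rfl, Or.inl (by simp [toN]; omega)⟩⟩
        · exact ⟨((z.1 + 1).toNat, z.2.toNat), hm, Or.inr ⟨rfl, Or.inr (by simp [toN]; omega)⟩⟩
        · exact ⟨(z.1.toNat, (z.2 - 1).toNat), hm, Or.inl ⟨rfl, Or.inl (by simp [toN]; omega)⟩⟩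
        · exact ⟨(z.1.toNat, (z.2 + 1).toNat), hm, Or.inl ⟨rfl, Or.inr (by simp [toN]; omega)⟩⟩
      · left; rfl
    rcases hstep with heq | ⟨hunm, hZz, ⟨p0, hp0m, hp0a⟩, heq⟩
    · rw [heq]; exact ih hztl st hsh
    · rw [heq]
      have hsh1 : Shape g (pvSet st.1 z.1 z.2 true) := shape_pvSet _ _ _ hsh
      have hmono1 : ∀ p, mget st.1 p = true → mget (pvSet st.1 z.1 z.2 true) p = true := by
        intro p hp
        rw [mget_pvSet hsh hz1 hr1 hz3 hc1 p]
        split_ifs with h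
        · rfl
        · exact hp
      have hcard1 : mcard g (pvSet st.1 z.1 z.2 true) = mcard g st.1 + 1 :=
        mcard_pvSet hsh hz1 hr1 hz3 hc1 hunm
      obtain ⟨S, M, C, D, SO⟩ := ih hztl (pvSet st.1 z.1 z.2 true, true) hsh1
      dsimp only at S M C D SO
      refine ⟨S, fun p hp => M p (hmono1 p hp), by omega, ?_, ?_⟩
      · rcases D with hD | ⟨hD, hDc⟩
        · exact Or.inr ⟨hD, by omega⟩
        · exact Or.inr ⟨hD, by omega⟩
      · intro hs0
        apply SO
        intro p hp
        rw [mget_pvSet hsh hz1 hr1 hz3 hc1 p] at hp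
        split_ifs at hp with h
        · subst h
          exact reachC_step (hs0 p0 hp0m) ⟨reachC_Zc (hs0 p0 hp0m), hZz, hp0a⟩
        · exact hs0 p hp

lemma sweepCell_true {g : List (List Int)} {rows cols r c : Int}
    {st : List (List Bool) × Bool} (h : st.2 = true) :
    (sweepCell g rows cols st r c).2 = true := by
  rw [sweepCell]
  split_ifs <;> simp [h]

lemma sweep_fold_ch_true {g : List (List Int)} {rows cols : Int} (zs : List (Int × Int))
    (st : List (List Bool) × Bool) (h : st.2 = true) :
    (zs.foldl (fun st z => sweepCell g rows cols st z.1 z.2) st).2 = true := by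
  induction zs generalizing st with
  | nil => exact h
  | cons z zs ih => exact ih _ (sweepCell_true h)

lemma sweep_fold_nochange {g : List (List Int)} {rows cols : Int} (zs : List (Int × Int))
    (v : List (List Bool))
    (h : (zs.foldl (fun st z => sweepCell g rows cols st z.1 z.2) (v, false)).2 = false) :
    (zs.foldl (fun st z => sweepCell g rows cols st z.1 z.2) (v, false)).1 = v ∧
      ∀ z ∈ zs, sweepCell g rows cols (v, false) z.1 z.2 = (v, false) := by
  induction zs with
  | nil => exact ⟨rfl, by simp⟩
  | cons z zs ih =>
    simp only [List.foldl_cons] at h ⊢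
    have h1 : (sweepCell g rows cols (v, false) z.1 z.2).2 = false := by
      by_contra hc
      rw [sweep_fold_ch_true zs _ (Bool.of_not_eq_false hc)] at h
      exact absurd h (by simp)
    have h2 : sweepCell g rows cols (v, false) z.1 z.2 = (v, false) := by
      revert h1
      rw [sweepCell]
      split_ifs with hc
      · intro h1; exact absurd h1 (by simp)
      · intro _; rfl
    rw [h2] at h ⊢
    obtain ⟨ha, hb⟩ := ih h
    refine ⟨ha, ?_⟩
    intro z' hz'
    rcases List.mem_cons.mp hz' with he | hm
    · subst he; exact h2
    · exact hb z' hm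

lemma sweep_closed {g : List (List Int)} {v : List (List Bool)}
    (hch : (pvSweep g (g.length : Int) ((g.headD []).length : Int) v).2 = false) :
    (pvSweep g (g.length : Int) ((g.headD []).length : Int) v).1 = v ∧
      ∀ p q, mget v p = true → AdjC g p q → mget v q = true := by
  rw [pvSweep_eq] at hch ⊢
  obtain ⟨ha, hb⟩ := sweep_fold_nochange _ v hch
  refine ⟨ha, ?_⟩
  intro p q hp hadj
  by_cases hq : mget v q = true
  · exact hq
  obtain ⟨hZp, hZq, hga⟩ := hadj
  have hq1 := hZq.1
  have hq2 := hZq.2.1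
  have hp1 := hZp.1
  have hp2 := hZp.2.1
  have hqmem : ((q.1 : Int), (q.2 : Int)) ∈ cellsOf (g.length : Int) ((g.headD []).length : Int) := by
    rw [mem_cellsOf]; dsimp only; omega
  have := hb _ hqmem
  rw [sweepCell] at this
  split_ifs at this with hcond
  · exact absurd (congrArg Prod.snd this) (by simp)
  · exfalso
    apply hcond
    dsimp only
    refine ⟨by simpa [pvGet] using hZq.2.2, by simpa [mget] using hq, ?_⟩
    obtain ⟨a, b⟩ := p
    obtain ⟨x, y⟩ := q
    dsimp only at hq1 hq2 hp1 hp2 ⊢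
    rcases hga with ⟨hey, hor⟩ | ⟨hex, hor⟩
    · dsimp only at hey hor
      subst hey
      rcases hor with h1 | h1
      · -- b + 1 = y : marked neighbour on the left
        refine Or.inr (Or.inr (Or.inl ⟨by omega, ?_⟩))
        have ht : ((y : Int) - 1).toNat = b := by omega
        simpa [pvGet, mget, ht] using hp
      · -- y + 1 = b : marked neighbour on the right
        refine Or.inr (Or.inr (Or.inr ⟨by omega, ?_⟩))
        have ht : ((y : Int) + 1).toNat = b := by omega
        simpa [pvGet, mget, ht] using hp
    · dsimp only at hex hor
      subst hex
      rcases hor with h1 | h1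
      · refine Or.inl ⟨by omega, ?_⟩
        have ht : ((x : Int) - 1).toNat = a := by omega
        simpa [pvGet, mget, ht] using hp
      · refine Or.inr (Or.inl ⟨by omega, ?_⟩)
        have ht : ((x : Int) + 1).toNat = a := by omega
        simpa [pvGet, mget, ht] using hp

lemma sweepLoop_props (g : List (List Int)) (fuel : Nat) :
    ∀ v : List (List Bool), Shape g v → (∀ p, mget v p = true → ReachC g p) →
    g.length * (g.headD []).length + 1 ≤ fuel + mcard g v →
    Shape g (sweepLoop g (g.length : Int) ((g.headD []).length : Int) fuel v) ∧
    (∀ p, mget v p = true →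
      mget (sweepLoop g (g.length : Int) ((g.headD []).length : Int) fuel v) p = true) ∧
    (∀ p, mget (sweepLoop g (g.length : Int) ((g.headD []).length : Int) fuel v) p = true → ReachC g p) ∧
    (∀ p q, mget (sweepLoop g (g.length : Int) ((g.headD []).length : Int) fuel v) p = true →
      AdjC g p q →
      mget (sweepLoop g (g.length : Int) ((g.headD []).length : Int) fuel v) q = true) := by
  induction fuel with
  | zero =>
    intro v _ _ hfuel
    have := mcard_le (g := g) v
    omega
  | succ fuel ih =>
    intro v hsh hsound hfuel
    rw [sweepLoop]
    have hcells : ∀ z ∈ cellsOf (g.length : Int) ((g.headD []).length : Int),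
        0 ≤ z.1 ∧ z.1 < (g.length : Int) ∧ 0 ≤ z.2 ∧ z.2 < ((g.headD []).length : Int) :=
      fun z hz => mem_cellsOf.mp hz
    have hprops := sweep_fold_props g _ hcells (v, false) hsh
    rw [← pvSweep_eq] at hprops
    obtain ⟨S, M, C, D, SO⟩ := hprops
    by_cases hch : (pvSweep g (g.length : Int) ((g.headD []).length : Int) v).2 = true
    · simp only [hch, if_true]
      have hlt : mcard g v < mcard g (pvSweep g (g.length : Int) ((g.headD []).length : Int) v).1 := by
        rcases D with hD | ⟨_, hlt⟩
        · rw [hch] at hD; exact absurd hD.symm (by simp)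
        · exact hlt
      obtain ⟨S2, M2, SO2, CL2⟩ := ih _ S (SO hsound) (by omega)
      exact ⟨S2, fun p hp => M2 p (M p hp), SO2, CL2⟩
    · rw [Bool.not_eq_true] at hch
      simp only [hch]
      obtain ⟨heq, hcl⟩ := sweep_closed hch
      rw [heq]
      exact ⟨hsh, fun _ h => h, hsound, hcl⟩

-- initial marking of B: zeros of the top row
lemma shape_reach0 (g : List (List Int)) :
    Shape g ((PySem.List.pyRange 0 (g.length : Int) 1).map (fun r =>
      (PySem.List.pyRange 0 ((g.headD []).length : Int) 1).map (fun c =>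
        decide (r = 0 ∧ pvGet g 0 c 0 = 0)))) := by
  constructor
  · simp [PySem.List.length_pyRange_one]
  · intro row hmem
    obtain ⟨r, _, hr⟩ := List.mem_map.mp hmem
    rw [← hr]
    simp [PySem.List.length_pyRange_one]

lemma mget_reach0 (g : List (List Int)) (hR : 0 < g.length) (p : Nat × Nat) :
    mget ((PySem.List.pyRange 0 (g.length : Int) 1).map (fun r =>
      (PySem.List.pyRange 0 ((g.headD []).length : Int) 1).map (fun c =>
        decide (r = 0 ∧ pvGet g 0 c 0 = 0)))) p = true ↔ p.1 = 0 ∧ Zc g p := by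
  obtain ⟨a, b⟩ := p
  by_cases ha : a < g.length
  · have hrowa : ((PySem.List.pyRange 0 (g.length : Int) 1).map (fun r =>
        (PySem.List.pyRange 0 ((g.headD []).length : Int) 1).map (fun c =>
          decide (r = 0 ∧ pvGet g 0 c 0 = 0)))).getD a [] =
        (PySem.List.pyRange 0 ((g.headD []).length : Int) 1).map (fun c =>
          decide ((a : Int) = 0 ∧ pvGet g 0 c 0 = 0)) := by
      rw [List.getD_eq_getElem?_getD,
        PySem.List.getElem?_map_pyRange_zero _ g.length a ha, Option.getD_some]
    rw [mget] at *
    rw [hrowa]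
    by_cases hb : b < (g.headD []).length
    · have hcellb : ((PySem.List.pyRange 0 ((g.headD []).length : Int) 1).map (fun c =>
          decide ((a : Int) = 0 ∧ pvGet g 0 c 0 = 0))).getD b false =
          decide ((a : Int) = 0 ∧ pvGet g 0 (b : Int) 0 = 0) := by
        rw [List.getD_eq_getElem?_getD,
          PySem.List.getElem?_map_pyRange_zero _ (g.headD []).length b hb, Option.getD_some]
      rw [hcellb]
      simp only [decide_eq_true_eq, pvGet, Zc]
      constructor
      · rintro ⟨ha0, hz⟩
        have ha0' : a = 0 := by exact_mod_cast ha0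
        subst ha0'
        exact ⟨rfl, hR, hb, by simpa using hz⟩
      · rintro ⟨ha0, _, _, hz⟩
        subst ha0
        exact ⟨rfl, by simpa using hz⟩
    · have hnone : ((PySem.List.pyRange 0 ((g.headD []).length : Int) 1).map (fun c =>
          decide ((a : Int) = 0 ∧ pvGet g 0 c 0 = 0)))[b]? = none := by
        apply List.getElem?_eq_none
        rw [List.length_map, PySem.List.length_pyRange_one]
        omega
      rw [List.getD_eq_getElem?_getD, hnone]
      simp only [Option.getD_none]
      constructor
      · intro h; exact absurd h (by simp)
      · rintro ⟨_, _, hbC, _⟩; exact absurd hbC hb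
  · have hnone : ((PySem.List.pyRange 0 (g.length : Int) 1).map (fun r =>
        (PySem.List.pyRange 0 ((g.headD []).length : Int) 1).map (fun c =>
          decide (r = 0 ∧ pvGet g 0 c 0 = 0))))[a]? = none := by
      apply List.getElem?_eq_none
      rw [List.length_map, PySem.List.length_pyRange_one]
      omega
    have houter : ((PySem.List.pyRange 0 (g.length : Int) 1).map (fun r =>
        (PySem.List.pyRange 0 ((g.headD []).length : Int) 1).map (fun c =>
          decide (r = 0 ∧ pvGet g 0 c 0 = 0)))).getD a [] = ([] : List Bool) := by
      rw [List.getD_eq_getElem?_getD, hnone]; rfl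
    rw [mget]
    dsimp only
    rw [houter, List.getD_nil]
    constructor
    · intro h; exact absurd h (by simp)
    · rintro ⟨ha0, hZ⟩; exact absurd (ha0 ▸ hZ.1) ha

lemma B_main (g : List (List Int)) (hR : 0 < g.length) :
    Shape g (sweepLoop g (g.length : Int) ((g.headD []).length : Int)
      (g.length * (g.headD []).length + 1)
      ((PySem.List.pyRange 0 (g.length : Int) 1).map (fun r =>
        (PySem.List.pyRange 0 ((g.headD []).length : Int) 1).map (fun c =>
          decide (r = 0 ∧ pvGet g 0 c 0 = 0))))) ∧
    (∀ p, mget (sweepLoop g (g.length : Int) ((g.headD []).length : Int)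
      (g.length * (g.headD []).length + 1)
      ((PySem.List.pyRange 0 (g.length : Int) 1).map (fun r =>
        (PySem.List.pyRange 0 ((g.headD []).length : Int) 1).map (fun c =>
          decide (r = 0 ∧ pvGet g 0 c 0 = 0))))) p = true ↔ ReachC g p) := by
  have hs0 : ∀ p, mget ((PySem.List.pyRange 0 (g.length : Int) 1).map (fun r =>
      (PySem.List.pyRange 0 ((g.headD []).length : Int) 1).map (fun c =>
        decide (r = 0 ∧ pvGet g 0 c 0 = 0)))) p = true → ReachC g p := by
    intro p hp
    obtain ⟨h0, hZ⟩ := (mget_reach0 g hR p).mp hp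
    obtain ⟨a, b⟩ := p
    dsimp only at h0
    subst h0
    exact reachC_seed hZ
  obtain ⟨S, M, SO, CL⟩ := sweepLoop_props g (g.length * (g.headD []).length + 1) _
    (shape_reach0 g) hs0 (by omega)
  refine ⟨S, fun p => ⟨SO p, ?_⟩⟩
  intro hreach
  refine reachC_closed (P := fun p => mget (sweepLoop g (g.length : Int) ((g.headD []).length : Int)
    (g.length * (g.headD []).length + 1)
    ((PySem.List.pyRange 0 (g.length : Int) 1).map (fun r =>
      (PySem.List.pyRange 0 ((g.headD []).length : Int) 1).map (fun c =>
        decide (r = 0 ∧ pvGet g 0 c 0 = 0))))) p = true) ?_ ?_ p hreach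
  · intro b hZb
    exact M _ ((mget_reach0 g hR (0, b)).mpr ⟨rfl, hZb⟩)
  · intro p q hp hadj
    exact CL p q hp hadj

-- ---------- A side: the BFS ----------

def dirsA : List (Int × Int) := [((-1 : Int), (0 : Int)), (1, 0), (0, -1), (0, 1)]

lemma bfsStep_cases (g : List (List Int)) (r c : Int) (st : List (List Bool) × List (Int × Int))
    (d : Int × Int) (hd : d ∈ dirsA) (hr : 0 ≤ r) (hc : 0 ≤ c) :
    bfsStep g (g.length : Int) ((g.headD []).length : Int) r c st d = st ∨
    (0 ≤ r + d.1 ∧ r + d.1 < (g.length : Int) ∧ 0 ≤ c + d.2 ∧ c + d.2 < ((g.headD []).length : Int) ∧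
      mget st.1 (toN (r + d.1, c + d.2)) = false ∧
      (g.getD (r + d.1).toNat []).getD (c + d.2).toNat 0 = 0 ∧
      GAdj (toN (r, c)) (toN (r + d.1, c + d.2)) ∧
      bfsStep g (g.length : Int) ((g.headD []).length : Int) r c st d =
        (pvSet st.1 (r + d.1) (c + d.2) true, st.2 ++ [(r + d.1, c + d.2)])) := by
  rw [bfsStep]
  split_ifs with h1 h2
  · right
    obtain ⟨hb1, hb2, hb3, hb4⟩ := h1
    obtain ⟨hunm, hzero⟩ := h2
    refine ⟨hb1, hb2, hb3, hb4, hunm, hzero, ?_, rfl⟩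
    have hd4 : d = ((-1 : Int), (0 : Int)) ∨ d = (1, 0) ∨ d = (0, -1) ∨ d = (0, 1) := by
      simpa [dirsA] using hd
    rcases hd4 with h | h | h | h
    all_goals subst h
    all_goals dsimp only at hb1 hb2 hb3 hb4
    · exact Or.inr ⟨by simp only [toN]; omega, Or.inr (by simp only [toN]; omega)⟩
    · exact Or.inr ⟨by simp only [toN]; omega, Or.inl (by simp only [toN]; omega)⟩
    · exact Or.inl ⟨by simp only [toN]; omega, Or.inr (by simp only [toN]; omega)⟩
    · exact Or.inl ⟨by simp only [toN]; omega, Or.inl (by simp only [toN]; omega)⟩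
  · left; rfl
  · left; rfl

lemma bfs_fold_props (g : List (List Int)) (r c : Int) (hr : 0 ≤ r) (hc : 0 ≤ c)
    (hreach : ReachC g (toN (r, c))) (ds : List (Int × Int)) (hds : ∀ d ∈ ds, d ∈ dirsA) :
    ∀ st : List (List Bool) × List (Int × Int), Shape g st.1 →
    (∀ p, mget st.1 p = true → ReachC g p) →
    Shape g (ds.foldl (bfsStep g (g.length : Int) ((g.headD []).length : Int) r c) st).1 ∧
    (∀ p, mget st.1 p = true →
      mget (ds.foldl (bfsStep g (g.length : Int) ((g.headD []).length : Int) r c) st).1 p = true) ∧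
    (∀ p, mget (ds.foldl (bfsStep g (g.length : Int) ((g.headD []).length : Int) r c) st).1 p = true →
      ReachC g p) ∧
    (∃ new, (ds.foldl (bfsStep g (g.length : Int) ((g.headD []).length : Int) r c) st).2 = st.2 ++ new) ∧
    (∀ z ∈ (ds.foldl (bfsStep g (g.length : Int) ((g.headD []).length : Int) r c) st).2,
      z ∈ st.2 ∨ (0 ≤ z.1 ∧ 0 ≤ z.2 ∧
        mget (ds.foldl (bfsStep g (g.length : Int) ((g.headD []).length : Int) r c) st).1 (toN z) = true)) ∧
    (∀ p, mget (ds.foldl (bfsStep g (g.length : Int) ((g.headD []).length : Int) r c) st).1 p = true →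
      mget st.1 p = true ∨
        ∃ z ∈ (ds.foldl (bfsStep g (g.length : Int) ((g.headD []).length : Int) r c) st).2, toN z = p) ∧
    (2 * (g.length * (g.headD []).length - mcard g (ds.foldl (bfsStep g (g.length : Int) ((g.headD []).length : Int) r c) st).1)
        + (ds.foldl (bfsStep g (g.length : Int) ((g.headD []).length : Int) r c) st).2.length ≤
      2 * (g.length * (g.headD []).length - mcard g st.1) + st.2.length) ∧
    (∀ d ∈ ds, 0 ≤ r + d.1 → r + d.1 < (g.length : Int) → 0 ≤ c + d.2 → c + d.2 < ((g.headD []).length : Int) →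
      (g.getD (r + d.1).toNat []).getD (c + d.2).toNat 0 = 0 →
      mget (ds.foldl (bfsStep g (g.length : Int) ((g.headD []).length : Int) r c) st).1 (toN (r + d.1, c + d.2)) = true) := by
  induction ds with
  | nil =>
    intro st hsh hsnd
    exact ⟨hsh, fun _ h => h, hsnd, ⟨[], by simp⟩, fun z hz => Or.inl hz, fun p hp => Or.inl hp,
      le_refl _, by simp⟩
  | cons d ds ih =>
    intro st hsh hsnd
    have hdd := hds d (List.mem_cons_self)
    have hdstl : ∀ d' ∈ ds, d' ∈ dirsA := fun d' h => hds d' (List.mem_cons_of_mem _ h)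
    simp only [List.foldl_cons]
    rcases bfsStep_cases g r c st d hdd hr hc with heq | hfire
    · rw [heq]
      obtain ⟨S, M, SO, ⟨new, hnew⟩, QZ, NM, ME, NB⟩ := ih hdstl st hsh hsnd
      refine ⟨S, M, SO, ⟨new, hnew⟩, QZ, NM, ME, ?_⟩
      intro d' hd' h1 h2 h3 h4 h5
      rcases List.mem_cons.mp hd' with he | hm
      · rw [he] at h1 h2 h3 h4 h5 ⊢
        -- the step on d did not fire although the neighbour is a valid zero: it was already marked
        have hmk : mget st.1 (toN (r + d.1, c + d.2)) = true := by
          by_contra hun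
          rw [Bool.not_eq_true] at hun
          rw [bfsStep] at heq
          split_ifs at heq with hb hcnd
          · have := congrArg Prod.snd heq
            simp at this
          · exact hcnd ⟨hun, h5⟩
          · exact hb ⟨h1, h2, h3, h4⟩
        exact M _ hmk
      · exact NB d' hm h1 h2 h3 h4 h5
    · obtain ⟨h1, h2, h3, h4, hunm, hzero, hga, heq⟩ := hfire
      rw [heq]
      have hrn : (r + d.1).toNat < g.length := by omega
      have hcn : (c + d.2).toNat < (g.headD []).length := by omega
      have hsh1 : Shape g (pvSet st.1 (r + d.1) (c + d.2) true) := shape_pvSet _ _ _ hsh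
      have hmono1 : ∀ p, mget st.1 p = true → mget (pvSet st.1 (r + d.1) (c + d.2) true) p = true := by
        intro p hp
        rw [mget_pvSet hsh h1 hrn h3 hcn p]
        split_ifs with h
        · rfl
        · exact hp
      have hmark1 : mget (pvSet st.1 (r + d.1) (c + d.2) true) (toN (r + d.1, c + d.2)) = true := by
        rw [mget_pvSet hsh h1 hrn h3 hcn _, if_pos rfl]
      have hZnew : Zc g (toN (r + d.1, c + d.2)) := ⟨hrn, hcn, hzero⟩
      have hsnd1 : ∀ p, mget (pvSet st.1 (r + d.1) (c + d.2) true) p = true → ReachC g p := by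
        intro p hp
        rw [mget_pvSet hsh h1 hrn h3 hcn p] at hp
        split_ifs at hp with h
        · subst h
          exact reachC_step hreach ⟨reachC_Zc hreach, hZnew, hga⟩
        · exact hsnd p hp
      have hcard1 : mcard g (pvSet st.1 (r + d.1) (c + d.2) true) = mcard g st.1 + 1 :=
        mcard_pvSet hsh h1 hrn h3 hcn hunm
      obtain ⟨S, M, SO, ⟨new, hnew⟩, QZ, NM, ME, NB⟩ :=
        ih hdstl (pvSet st.1 (r + d.1) (c + d.2) true, st.2 ++ [(r + d.1, c + d.2)]) hsh1 hsnd1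
      dsimp only at S M SO hnew QZ NM ME NB
      have hcardle : mcard g (pvSet st.1 (r + d.1) (c + d.2) true) ≤ g.length * (g.headD []).length :=
        mcard_le _
      refine ⟨S, fun p hp => M p (hmono1 p hp), SO, ⟨(r + d.1, c + d.2) :: new, by rw [hnew, List.append_assoc]; rfl⟩, ?_, ?_, ?_, ?_⟩
      · intro z hz
        rcases QZ z hz with hin | hprops
        · rcases List.mem_append.mp hin with hin' | hin'
          · exact Or.inl hin'
          · have hz' : z = (r + d.1, c + d.2) := by simpa using hin'
            subst hz'
            exact Or.inr ⟨by omega, by omega, M _ hmark1⟩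
        · exact Or.inr hprops
      · intro p hp
        rcases NM p hp with hold | hq
        · rw [mget_pvSet hsh h1 hrn h3 hcn p] at hold
          split_ifs at hold with h
          · subst h
            -- the newly marked cell is in the queue
            refine Or.inr ⟨(r + d.1, c + d.2), ?_, rfl⟩
            obtain ⟨new', hnew'⟩ : ∃ new', (ds.foldl (bfsStep g (g.length : Int) ((g.headD []).length : Int) r c) (pvSet st.1 (r + d.1) (c + d.2) true, st.2 ++ [(r + d.1, c + d.2)])).2 = (st.2 ++ [(r + d.1, c + d.2)]) ++ new' := ⟨new, hnew⟩
            rw [hnew']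
            simp
          · exact Or.inl hold
        · exact Or.inr hq
      · refine le_trans ME ?_
        simp only [List.length_append, List.length_cons, List.length_nil]
        omega
      · intro d' hd' h1' h2' h3' h4' h5'
        rcases List.mem_cons.mp hd' with he | hm
        · rw [he]
          exact M _ hmark1
        · exact NB d' hm h1' h2' h3' h4' h5'

lemma adj_to_dir (g : List (List Int)) {r c : Int} (hr : 0 ≤ r) (hc : 0 ≤ c) {p' : Nat × Nat}
    (hadj : AdjC g (toN (r, c)) p') :
    ∃ d ∈ dirsA, 0 ≤ r + d.1 ∧ r + d.1 < (g.length : Int) ∧ 0 ≤ c + d.2 ∧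
      c + d.2 < ((g.headD []).length : Int) ∧
      (g.getD (r + d.1).toNat []).getD (c + d.2).toNat 0 = 0 ∧ toN (r + d.1, c + d.2) = p' := by
  obtain ⟨hZp, hZq, hga⟩ := hadj
  obtain ⟨a, b⟩ := p'
  have hb1 : a < g.length := hZq.1
  have hb2 : b < (g.headD []).length := hZq.2.1
  have hz : (g.getD a []).getD b 0 = 0 := hZq.2.2
  simp only [toN] at hga
  rcases hga with ⟨h1, h2 | h2⟩ | ⟨h1, h2 | h2⟩
  · -- same row, b = c.toNat + 1 : d = (0, 1)
    refine ⟨(0, 1), by simp [dirsA], by omega, by omega, by omega, by omega, ?_, ?_⟩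
    · have e1 : (r + (0 : Int)).toNat = a := by omega
      have e2 : (c + (1 : Int)).toNat = b := by omega
      rw [e1, e2]; exact hz
    · simp only [toN, Prod.mk.injEq]; omega
  · -- same row, b + 1 = c.toNat : d = (0, -1)
    refine ⟨(0, -1), by simp [dirsA], by omega, by omega, by omega, by omega, ?_, ?_⟩
    · have e1 : (r + (0 : Int)).toNat = a := by omega
      have e2 : (c + (-1 : Int)).toNat = b := by omega
      rw [e1, e2]; exact hz
    · simp only [toN, Prod.mk.injEq]; omega
  · -- same column, a = r.toNat + 1 : d = (1, 0)
    refine ⟨(1, 0), by simp [dirsA], by omega, by omega, by omega, by omega, ?_, ?_⟩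
    · have e1 : (r + (1 : Int)).toNat = a := by omega
      have e2 : (c + (0 : Int)).toNat = b := by omega
      rw [e1, e2]; exact hz
    · simp only [toN, Prod.mk.injEq]; omega
  · -- same column, a + 1 = r.toNat : d = (-1, 0)
    refine ⟨(-1, 0), by simp [dirsA], by omega, by omega, by omega, by omega, ?_, ?_⟩
    · have e1 : (r + (-1 : Int)).toNat = a := by omega
      have e2 : (c + (0 : Int)).toNat = b := by omega
      rw [e1, e2]; exact hz
    · simp only [toN, Prod.mk.injEq]; omega

lemma bfsLoop_props (g : List (List Int)) (fuel : Nat) :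
    ∀ (v : List (List Bool)) (q : List (Int × Int)), Shape g v →
    (∀ z ∈ q, 0 ≤ z.1 ∧ 0 ≤ z.2 ∧ mget v (toN z) = true) →
    (∀ p, mget v p = true → ReachC g p) →
    (∀ p, mget v p = true → (∃ z ∈ q, toN z = p) ∨ ∀ p', AdjC g p p' → mget v p' = true) →
    2 * (g.length * (g.headD []).length - mcard g v) + q.length ≤ fuel →
    Shape g (bfsLoop g (g.length : Int) ((g.headD []).length : Int) fuel v q) ∧
    (∀ p, mget v p = true →
      mget (bfsLoop g (g.length : Int) ((g.headD []).length : Int) fuel v q) p = true) ∧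
    (∀ p, mget (bfsLoop g (g.length : Int) ((g.headD []).length : Int) fuel v q) p = true →
      ReachC g p) ∧
    (∀ p p', mget (bfsLoop g (g.length : Int) ((g.headD []).length : Int) fuel v q) p = true →
      AdjC g p p' →
      mget (bfsLoop g (g.length : Int) ((g.headD []).length : Int) fuel v q) p' = true) := by
  induction fuel with
  | zero =>
    intro v q hsh hQ hsnd hclq hmeas
    have hq : q = [] := List.eq_nil_of_length_eq_zero (by omega)
    subst hq
    rw [bfsLoop]
    refine ⟨hsh, fun _ h => h, hsnd, ?_⟩
    intro p p' hp hadj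
    rcases hclq p hp with ⟨z, hz, _⟩ | hcl
    · exact absurd hz (by simp)
    · exact hcl p' hadj
  | succ fuel ih =>
    intro v q hsh hQ hsnd hclq hmeas
    match q with
    | [] =>
      rw [bfsLoop]
      refine ⟨hsh, fun _ h => h, hsnd, ?_⟩
      intro p p' hp hadj
      rcases hclq p hp with ⟨z, hz, _⟩ | hcl
      · exact absurd hz (by simp)
      · exact hcl p' hadj
    | (r, c) :: q' =>
      obtain ⟨hr0, hc0, hmrc⟩ := hQ (r, c) (List.mem_cons_self)
      have hreach : ReachC g (toN (r, c)) := hsnd _ hmrc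
      obtain ⟨S, M, SO, ⟨new, hnew⟩, QZ, NM, ME, NB⟩ :=
        bfs_fold_props g r c hr0 hc0 hreach dirsA (fun _ h => h) (v, q') hsh hsnd
      dsimp only at S M SO hnew QZ NM ME NB
      rw [bfsLoop]
      show _ ∧ _ ∧ _ ∧ _
      have hQ1 : ∀ z ∈ (dirsA.foldl (bfsStep g (g.length : Int) ((g.headD []).length : Int) r c) (v, q')).2,
          0 ≤ z.1 ∧ 0 ≤ z.2 ∧
          mget (dirsA.foldl (bfsStep g (g.length : Int) ((g.headD []).length : Int) r c) (v, q')).1 (toN z) = true := by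
        intro z hz
        rcases QZ z hz with hin | hprops
        · obtain ⟨hz1, hz2, hz3⟩ := hQ z (List.mem_cons_of_mem _ hin)
          exact ⟨hz1, hz2, M _ hz3⟩
        · exact hprops
      have hclq1 : ∀ p, mget (dirsA.foldl (bfsStep g (g.length : Int) ((g.headD []).length : Int) r c) (v, q')).1 p = true →
          (∃ z ∈ (dirsA.foldl (bfsStep g (g.length : Int) ((g.headD []).length : Int) r c) (v, q')).2, toN z = p) ∨
          ∀ p', AdjC g p p' →
            mget (dirsA.foldl (bfsStep g (g.length : Int) ((g.headD []).length : Int) r c) (v, q')).1 p' = true := by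
        intro p hp
        rcases NM p hp with hold | hq
        · rcases hclq p hold with ⟨z, hz, hze⟩ | hcl
          · rcases List.mem_cons.mp hz with he | hm
            · subst he
              right
              intro p' hadj
              rw [← hze] at hadj
              obtain ⟨d, hd, hb1, hb2, hb3, hb4, hzz, hpe⟩ := adj_to_dir g hr0 hc0 hadj
              rw [← hpe]
              exact NB d hd hb1 hb2 hb3 hb4 hzz
            · exact Or.inl ⟨z, by rw [hnew]; exact List.mem_append_left _ hm, hze⟩
          · exact Or.inr (fun p' hadj => M _ (hcl p' hadj))
        · exact Or.inl hq
      have hmeas1 : 2 * (g.length * (g.headD []).length -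
            mcard g (dirsA.foldl (bfsStep g (g.length : Int) ((g.headD []).length : Int) r c) (v, q')).1) +
          (dirsA.foldl (bfsStep g (g.length : Int) ((g.headD []).length : Int) r c) (v, q')).2.length ≤ fuel := by
        have := ME
        simp only [List.length_cons] at hmeas
        omega
      obtain ⟨S2, M2, SO2, CL2⟩ := ih _ _ S hQ1 SO hclq1 hmeas1
      exact ⟨S2, fun p hp => M2 p (M p hp), SO2, CL2⟩

lemma seed_fold_props (g : List (List Int)) (hR : 0 < g.length) (cs : List Int)
    (hcs : ∀ cc ∈ cs, 0 ≤ cc ∧ cc < ((g.headD []).length : Int)) :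
    ∀ st : List (List Bool) × List (Int × Int), Shape g st.1 →
    Shape g (cs.foldl (fun (st : List (List Bool) × List (Int × Int)) c =>
      if pvGet g 0 c 0 = 0 then (pvSet st.1 0 c true, st.2 ++ [((0 : Int), c)]) else st) st).1 ∧
    (∀ p, mget st.1 p = true →
      mget (cs.foldl (fun (st : List (List Bool) × List (Int × Int)) c =>
        if pvGet g 0 c 0 = 0 then (pvSet st.1 0 c true, st.2 ++ [((0 : Int), c)]) else st) st).1 p = true) ∧
    ((∀ p, mget st.1 p = true → ReachC g p) →
      ∀ p, mget (cs.foldl (fun (st : List (List Bool) × List (Int × Int)) c =>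
        if pvGet g 0 c 0 = 0 then (pvSet st.1 0 c true, st.2 ++ [((0 : Int), c)]) else st) st).1 p = true → ReachC g p) ∧
    ((∀ z ∈ st.2, 0 ≤ z.1 ∧ 0 ≤ z.2 ∧ mget st.1 (toN z) = true) →
      ∀ z ∈ (cs.foldl (fun (st : List (List Bool) × List (Int × Int)) c =>
        if pvGet g 0 c 0 = 0 then (pvSet st.1 0 c true, st.2 ++ [((0 : Int), c)]) else st) st).2,
        0 ≤ z.1 ∧ 0 ≤ z.2 ∧
        mget (cs.foldl (fun (st : List (List Bool) × List (Int × Int)) c =>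
          if pvGet g 0 c 0 = 0 then (pvSet st.1 0 c true, st.2 ++ [((0 : Int), c)]) else st) st).1 (toN z) = true) ∧
    ((∀ p, mget st.1 p = true → ∃ z ∈ st.2, toN z = p) →
      ∀ p, mget (cs.foldl (fun (st : List (List Bool) × List (Int × Int)) c =>
        if pvGet g 0 c 0 = 0 then (pvSet st.1 0 c true, st.2 ++ [((0 : Int), c)]) else st) st).1 p = true →
        ∃ z ∈ (cs.foldl (fun (st : List (List Bool) × List (Int × Int)) c =>
          if pvGet g 0 c 0 = 0 then (pvSet st.1 0 c true, st.2 ++ [((0 : Int), c)]) else st) st).2, toN z = p) ∧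
    ((cs.foldl (fun (st : List (List Bool) × List (Int × Int)) c =>
      if pvGet g 0 c 0 = 0 then (pvSet st.1 0 c true, st.2 ++ [((0 : Int), c)]) else st) st).2.length ≤
      st.2.length + cs.length) ∧
    (∀ cc ∈ cs, pvGet g 0 cc 0 = 0 →
      mget (cs.foldl (fun (st : List (List Bool) × List (Int × Int)) c =>
        if pvGet g 0 c 0 = 0 then (pvSet st.1 0 c true, st.2 ++ [((0 : Int), c)]) else st) st).1 (toN (0, cc)) = true) := by
  induction cs with
  | nil =>
    intro st hsh
    exact ⟨hsh, fun _ h => h, fun h => h, fun h => h, fun h => h, by simp, by simp⟩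
  | cons cc cs ih =>
    intro st hsh
    obtain ⟨hc0, hcC⟩ := hcs cc (List.mem_cons_self)
    have hcstl : ∀ c' ∈ cs, 0 ≤ c' ∧ c' < ((g.headD []).length : Int) :=
      fun c' h => hcs c' (List.mem_cons_of_mem _ h)
    simp only [List.foldl_cons]
    have hcn : cc.toNat < (g.headD []).length := by omega
    by_cases hz : pvGet g 0 cc 0 = 0
    · rw [if_pos hz]
      have hsh1 : Shape g (pvSet st.1 0 cc true) := shape_pvSet _ _ _ hsh
      have hmono1 : ∀ p, mget st.1 p = true → mget (pvSet st.1 0 cc true) p = true := by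
        intro p hp
        rw [mget_pvSet hsh (le_refl 0) (by omega) hc0 hcn p]
        split_ifs with h
        · rfl
        · exact hp
      have hmark1 : mget (pvSet st.1 0 cc true) (toN (0, cc)) = true := by
        rw [mget_pvSet hsh (le_refl 0) (by omega) hc0 hcn _, if_pos rfl]
      obtain ⟨S, M, SO, QQ, AQ, LE, CO⟩ := ih hcstl (pvSet st.1 0 cc true, st.2 ++ [((0 : Int), cc)]) hsh1
      dsimp only at S M SO QQ AQ LE CO
      refine ⟨S, fun p hp => M p (hmono1 p hp), ?_, ?_, ?_, ?_, ?_⟩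
      · intro hsnd
        apply SO
        intro p hp
        rw [mget_pvSet hsh (le_refl 0) (by omega) hc0 hcn p] at hp
        split_ifs at hp with h
        · subst h
          exact reachC_seed ⟨hR, hcn, by simpa [pvGet] using hz⟩
        · exact hsnd p hp
      · intro hQ
        apply QQ
        intro z hzm
        rcases List.mem_append.mp hzm with hin | hin
        · obtain ⟨h1, h2, h3⟩ := hQ z hin
          exact ⟨h1, h2, hmono1 _ h3⟩
        · have hze : z = ((0 : Int), cc) := by simpa using hin
          subst hze
          exact ⟨le_refl 0, hc0, hmark1⟩
      · intro hAQ
        have hAQ1 : ∀ p, mget (pvSet st.1 0 cc true) p = true →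
            ∃ z ∈ st.2 ++ [((0 : Int), cc)], toN z = p := by
          intro p hp
          rw [mget_pvSet hsh (le_refl 0) (by omega) hc0 hcn p] at hp
          split_ifs at hp with h
          · exact ⟨((0 : Int), cc), List.mem_append_right _ (by simp), h.symm⟩
          · obtain ⟨z, hz1, hz2⟩ := hAQ p hp
            exact ⟨z, List.mem_append_left _ hz1, hz2⟩
        exact AQ hAQ1
      · refine le_trans LE ?_
        simp only [List.length_append, List.length_cons, List.length_nil]
        omega
      · intro c' hc' hzc'
        rcases List.mem_cons.mp hc' with he | hm
        · rw [he]
          exact M _ hmark1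
        · exact CO c' hm hzc'
    · rw [if_neg hz]
      obtain ⟨S, M, SO, QQ, AQ, LE, CO⟩ := ih hcstl st hsh
      refine ⟨S, M, SO, QQ, AQ, by simpa using Nat.le_succ_of_le LE, ?_⟩
      intro c' hc' hzc'
      rcases List.mem_cons.mp hc' with he | hm
      · rw [he] at hzc'; exact absurd hzc' hz
      · exact CO c' hm hzc'

lemma shape_rep (g : List (List Int)) :
    Shape g (List.replicate g.length (List.replicate (g.headD []).length false)) := by
  refine ⟨by simp, ?_⟩
  intro row hmem
  rw [List.eq_of_mem_replicate hmem]
  simp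

lemma mget_rep (g : List (List Int)) (p : Nat × Nat) :
    mget (List.replicate g.length (List.replicate (g.headD []).length false)) p = false := by
  rw [mget]
  rcases Nat.lt_or_ge p.1 g.length with h | h
  · have hrow : (List.replicate g.length (List.replicate (g.headD []).length false)).getD p.1 [] =
        List.replicate (g.headD []).length false := by
      rw [List.getD_eq_getElem?_getD, List.getElem?_replicate, if_pos h]
      rfl
    rw [hrow, List.getD_eq_getElem?_getD, List.getElem?_replicate]
    split_ifs with h2 <;> rfl
  · have hrow : (List.replicate g.length (List.replicate (g.headD []).length false)).getD p.1 [] =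
        ([] : List Bool) := by
      rw [List.getD_eq_getElem?_getD, List.getElem?_replicate, if_neg (by omega)]
      rfl
    rw [hrow]
    rfl

lemma A_main (g : List (List Int)) (hR : 0 < g.length) :
    Shape g (bfsLoop g (g.length : Int) ((g.headD []).length : Int)
      (3 * g.length * (g.headD []).length + 3)
      (((PySem.List.pyRange 0 ((g.headD []).length : Int) 1).foldl
        (fun (st : List (List Bool) × List (Int × Int)) c =>
          if pvGet g 0 c 0 = 0 then (pvSet st.1 0 c true, st.2 ++ [((0 : Int), c)]) else st)
        (List.replicate g.length (List.replicate (g.headD []).length false), [])).1)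
      (((PySem.List.pyRange 0 ((g.headD []).length : Int) 1).foldl
        (fun (st : List (List Bool) × List (Int × Int)) c =>
          if pvGet g 0 c 0 = 0 then (pvSet st.1 0 c true, st.2 ++ [((0 : Int), c)]) else st)
        (List.replicate g.length (List.replicate (g.headD []).length false), [])).2)) ∧
    (∀ p, mget (bfsLoop g (g.length : Int) ((g.headD []).length : Int)
      (3 * g.length * (g.headD []).length + 3)
      (((PySem.List.pyRange 0 ((g.headD []).length : Int) 1).foldl
        (fun (st : List (List Bool) × List (Int × Int)) c =>
          if pvGet g 0 c 0 = 0 then (pvSet st.1 0 c true, st.2 ++ [((0 : Int), c)]) else st)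
        (List.replicate g.length (List.replicate (g.headD []).length false), [])).1)
      (((PySem.List.pyRange 0 ((g.headD []).length : Int) 1).foldl
        (fun (st : List (List Bool) × List (Int × Int)) c =>
          if pvGet g 0 c 0 = 0 then (pvSet st.1 0 c true, st.2 ++ [((0 : Int), c)]) else st)
        (List.replicate g.length (List.replicate (g.headD []).length false), [])).2)) p = true ↔
      ReachC g p) := by
  have hsnd0 : ∀ p, mget (List.replicate g.length (List.replicate (g.headD []).length false)) p = true →
      ReachC g p := by
    intro p hp
    rw [mget_rep] at hp
    exact absurd hp (by simp)
  have hallq0 : ∀ p, mget (List.replicate g.length (List.replicate (g.headD []).length false)) p = true →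
      ∃ z ∈ ([] : List (Int × Int)), toN z = p := by
    intro p hp
    rw [mget_rep] at hp
    exact absurd hp (by simp)
  obtain ⟨S, M, SO, QQ, AQ, LE, CO⟩ := seed_fold_props g hR (PySem.List.pyRange 0 ((g.headD []).length : Int) 1)
    (fun cc h => PySem.List.mem_pyRange_one.mp h)
    (List.replicate g.length (List.replicate (g.headD []).length false), []) (shape_rep g)
  dsimp only at S M SO QQ AQ LE CO
  have hQ1 := QQ (by simp)
  have hsnd1 := SO hsnd0
  have hCle : (g.headD []).length ≤ g.length * (g.headD []).length :=
    Nat.le_mul_of_pos_left _ hR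
  have hmeas1 : 2 * (g.length * (g.headD []).length -
        mcard g (((PySem.List.pyRange 0 ((g.headD []).length : Int) 1).foldl
          (fun (st : List (List Bool) × List (Int × Int)) c =>
            if pvGet g 0 c 0 = 0 then (pvSet st.1 0 c true, st.2 ++ [((0 : Int), c)]) else st)
          (List.replicate g.length (List.replicate (g.headD []).length false), [])).1)) +
      (((PySem.List.pyRange 0 ((g.headD []).length : Int) 1).foldl
          (fun (st : List (List Bool) × List (Int × Int)) c =>
            if pvGet g 0 c 0 = 0 then (pvSet st.1 0 c true, st.2 ++ [((0 : Int), c)]) else st)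
          (List.replicate g.length (List.replicate (g.headD []).length false), [])).2).length ≤
      3 * g.length * (g.headD []).length + 3 := by
    have hlen : (PySem.List.pyRange 0 ((g.headD []).length : Int) 1).length = (g.headD []).length := by
      rw [PySem.List.length_pyRange_one]
      omega
    rw [hlen] at LE
    have hC : (g.headD []).length ≤ g.length * (g.headD []).length :=
      Nat.le_mul_of_pos_left _ hR
    have hsub : g.length * (g.headD []).length -
        mcard g (((PySem.List.pyRange 0 ((g.headD []).length : Int) 1).foldl
          (fun (st : List (List Bool) × List (Int × Int)) c =>
            if pvGet g 0 c 0 = 0 then (pvSet st.1 0 c true, st.2 ++ [((0 : Int), c)]) else st)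
          (List.replicate g.length (List.replicate (g.headD []).length false), [])).1) ≤
        g.length * (g.headD []).length := Nat.sub_le _ _
    rw [Nat.mul_assoc 3]
    simp only [List.length_nil] at LE
    omega
  obtain ⟨S2, M2, SO2, CL2⟩ := bfsLoop_props g (3 * g.length * (g.headD []).length + 3) _ _
    S hQ1 hsnd1 (fun p hp => Or.inl (AQ hallq0 p hp)) hmeas1
  refine ⟨S2, fun p => ⟨SO2 p, ?_⟩⟩
  intro hreach
  refine reachC_closed ?_ (fun p q hp hadj => CL2 p q hp hadj) p hreach
  intro b hZb
  apply M2
  have hmem : (b : Int) ∈ PySem.List.pyRange 0 ((g.headD []).length : Int) 1 := by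
    rw [PySem.List.mem_pyRange_one]
    have := hZb.2.1
    omega
  have hzero : pvGet g 0 (b : Int) 0 = 0 := by
    have := hZb.2.2
    simpa [pvGet] using this
  have := CO (b : Int) hmem hzero
  simpa [toN] using this

lemma transform_eq_alt (g : List (List Int)) : transform g = transform_alt g := by
  by_cases hguard : g = [] ∨ g.headD [] = []
  · rw [transform, transform_alt, if_pos hguard, if_pos hguard]
  · rw [not_or] at hguard
    have hR : 0 < g.length := List.length_pos_iff.mpr hguard.1
    obtain ⟨SA, HA⟩ := A_main g hR
    obtain ⟨SB, HB⟩ := B_main g hR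
    have hveq := matrix_eq SA SB (fun p => by
      by_cases hr : ReachC g p
      · rw [(HA p).mpr hr, (HB p).mpr hr]
      · rw [Bool.eq_false_iff.mpr (fun h => hr ((HA p).mp h)),
          Bool.eq_false_iff.mpr (fun h => hr ((HB p).mp h))])
    rw [transform, transform_alt, if_neg (by tauto), if_neg (by tauto)]
    exact congrArg (pvFill g (g.length : Int) ((g.headD []).length : Int)) hveq

-- ===== VERDICT (by name: the statement is the Claim_ definition above) =====
theorem transform_spec : Claim_equal_transform := by
  unfold Claim_equal_transform Spec_transform
  intro g _ _
  exact transform_eq_alt g
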